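-- pv_equiv track=rewrite | github.com/raeez/chiral-bar-cobar | compute/lib/bar_gf_algebraicity.py | betagamma_full_gf_coeffs
-- ===== SOURCE A (Python) =====
-- from typing import Dict, List, Optional, Tuple
--
-- def betagamma_full_gf_coeffs(N: int) -> List[int]:
--     r"""Full coefficients [a_0, a_1, ..., a_{N-1}] of sqrt((1+x)/(1-3x)).
--
--     Includes a_0 = 1.
--     """
--     a = [0] * N
--     a[0] = 1
--     if N > 1:
--         a[1] = 2
--     for n in range(2, N):
--         a[n] = (2 * n * a[n - 1] + 3 * (n - 2) * a[n - 2]) // n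
--     return a
-- ===== SOURCE B (Python) =====
-- from typing import List
--
--
-- def betagamma_full_gf_coeffs(N: int) -> List[int]:
--     """Full coefficients [a_0, ..., a_{N-1}] of sqrt((1+x)/(1-3x)).
--
--     Uses sqrt((1+x)/(1-3x)) = (1+x)/sqrt(1-2x-3x^2): a_0 = 1 and
--     a_n = T_n + T_{n-1}, where T_n are the central trinomial
--     coefficients, carried along as a rolling pair via
--     (n+1) T_{n+1} = (2n+1) T_n + 3n T_{n-1}.
--     """
--     coeffs = []
--     t_prev, t_cur = 1, 1  # T_{n-1}, T_n
--     for n in range(N):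
--         if n == 0:
--             coeffs.append(1)
--         else:
--             coeffs.append(t_cur + t_prev)
--             t_prev, t_cur = t_cur, ((2 * n + 1) * t_cur + 3 * n * t_prev) // (n + 1)
--     return coeffs
-- ===== Notes on version B (the rewrite author's own statement) =====
-- stated objective: alternative
-- what changed: A runs the two-term P-recurrence n*a[n]=2n*a[n-1]+3(n-2)*a[n-2] in a preallocated array; B instead streams a rolling pair of central trinomial coefficients T_n (recurrence (n+1)T_{n+1}=(2n+1)T_n+3n*T_{n-1}) and appends a_0=1, a_n=T_n+T_{n-1}, using sqrt((1+x)/(1-3x))=(1+x)/sqrt(1-2x-3x^2).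
-- outside the precondition, e.g. on betagamma_full_gf_coeffs(0): A raises IndexError, B returns []
import Mathlib
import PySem

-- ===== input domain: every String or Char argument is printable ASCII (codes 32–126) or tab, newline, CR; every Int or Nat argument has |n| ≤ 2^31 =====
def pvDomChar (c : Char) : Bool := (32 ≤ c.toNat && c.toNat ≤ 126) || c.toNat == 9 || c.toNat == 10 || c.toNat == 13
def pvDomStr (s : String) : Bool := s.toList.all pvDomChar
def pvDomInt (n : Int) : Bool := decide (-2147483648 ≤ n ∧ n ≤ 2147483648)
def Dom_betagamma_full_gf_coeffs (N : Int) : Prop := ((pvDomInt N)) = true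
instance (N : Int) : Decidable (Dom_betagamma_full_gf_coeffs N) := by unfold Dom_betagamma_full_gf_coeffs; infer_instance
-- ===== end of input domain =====

-- B replaces A's in-place two-term recurrence on the result array by a streaming pass that
-- carries a rolling pair of central trinomial coefficients T_n and appends a_0 = 1,
-- a_n = T_n + T_(n-1) (objective: alternative algorithm; not faster).

-- ===== PORT A =====
def betagamma_full_gf_coeffs (N : Int) : List Int :=
  let a := PySem.List.pyRepeat [(0 : Int)] N
  let a := PySem.List.pySetD a 0 1
  let a := if N > 1 then PySem.List.pySetD a 1 2 else a
  (PySem.List.pyRange 2 N 1).foldl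
    (fun a n =>
      PySem.List.pySetD a n
        (PySem.Int.floordiv
          (2 * n * PySem.List.pyGetD a (n - 1) 0 + 3 * (n - 2) * PySem.List.pyGetD a (n - 2) 0)
          n))
    a

-- ===== PORT B =====
def betagamma_full_gf_coeffs_alt (N : Int) : List Int :=
  ((PySem.List.pyRange 0 N 1).foldl
    (fun st n =>
      if n == 0 then (st.1 ++ [(1 : Int)], st.2)
      else (st.1 ++ [st.2.2 + st.2.1],
            (st.2.2, PySem.Int.floordiv ((2 * n + 1) * st.2.2 + 3 * n * st.2.1) (n + 1))))
    (([] : List Int), ((1 : Int), (1 : Int)))).1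

-- ===== PRECONDITION & SPEC =====
-- Pre_ excludes exactly N <= 0: there A raises IndexError at a[0] = 1 on the empty
-- preallocated list (B's loop over range(N) is simply empty and it returns []).
def Pre_betagamma_full_gf_coeffs (N : Int) : Prop := 1 ≤ N
instance (N : Int) : Decidable (Pre_betagamma_full_gf_coeffs N) := by unfold Pre_betagamma_full_gf_coeffs; infer_instance
def pvWitness_betagamma_full_gf_coeffs : Int := 5

def Spec_betagamma_full_gf_coeffs (N : Int) (out : List Int) : Prop := out = betagamma_full_gf_coeffs_alt N
instance (N : Int) (out : List Int) : Decidable (Spec_betagamma_full_gf_coeffs N out) := by unfold Spec_betagamma_full_gf_coeffs; infer_instance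

-- ===== CLAIM (what is proved, stated in full; the proofs are below) =====
def Claim_equal_betagamma_full_gf_coeffs : Prop := ∀ (N : Int), Dom_betagamma_full_gf_coeffs N → Pre_betagamma_full_gf_coeffs N → Spec_betagamma_full_gf_coeffs N (betagamma_full_gf_coeffs N)
-- ===== LEMMAS AND PROOFS =====

-- A's sequence: a_0 = 1, a_1 = 2, a_n = (2n·a_(n-1) + 3(n-2)·a_(n-2)) // n.
def aSeq : Nat → Int
  | 0 => 1
  | 1 => 2
  | (n + 2) =>
      PySem.Int.floordiv
        (2 * ((n : Int) + 2) * aSeq (n + 1) + 3 * (n : Int) * aSeq n) ((n : Int) + 2)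

-- coefficients of (1+x)/(1-3x)
def cSeq : Nat → Int
  | 0 => 1
  | (n + 1) => 4 * 3 ^ n

def S (m : Nat) : Int := ∑ k ∈ Finset.range (m + 1), aSeq k * aSeq (m - k)

def InvP (n : Nat) : Prop :=
  (∀ m, 1 ≤ m → m ≤ n → (2 : Int) ∣ aSeq m) ∧
  (∀ m, 2 ≤ m → m ≤ n → (m : Int) * aSeq m = 2 * m * aSeq (m - 1) + 3 * ((m : Int) - 2) * aSeq (m - 2)) ∧
  (∀ m, m ≤ n → S m = cSeq m)

theorem aSeq_zero : aSeq 0 = 1 := rfl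
theorem aSeq_one : aSeq 1 = 2 := rfl

theorem aSeq_eq (m : Nat) (hm : 2 ≤ m) :
    aSeq m = PySem.Int.floordiv
      (2 * (m : Int) * aSeq (m - 1) + 3 * ((m : Int) - 2) * aSeq (m - 2)) m := by
  obtain ⟨p, rfl⟩ : ∃ p, m = p + 2 := ⟨m - 2, by omega⟩
  show aSeq (p + 2) = _
  have e1 : p + 2 - 1 = p + 1 := by omega
  have e2 : p + 2 - 2 = p := by omega
  rw [aSeq, e1, e2, show ((p+2:Nat):Int) = (p:Int)+2 by push_cast; ring]
  norm_num

theorem refl_weighted (a : Nat → Int) (m : Nat) :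
    2 * ∑ k ∈ Finset.range (m+1), (k:Int) * a k * a (m-k)
      = (m:Int) * ∑ k ∈ Finset.range (m+1), a k * a (m-k) := by
  have h := Finset.sum_range_reflect (fun k => (k:Int) * a k * a (m-k)) (m+1)
  simp only [Nat.add_sub_cancel] at h
  have h2 : ∑ j ∈ Finset.range (m+1), ((m - j : Nat) : Int) * a (m-j) * a (m-(m-j))
      = ∑ j ∈ Finset.range (m+1), ((m:Int) - j) * a (m-j) * a j := by
    refine Finset.sum_congr rfl (fun j hj => ?_)
    have hj' : j ≤ m := Nat.lt_succ_iff.mp (Finset.mem_range.mp hj)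
    rw [Nat.sub_sub_self hj']
    push_cast [hj']
    ring
  calc 2 * ∑ k ∈ Finset.range (m+1), (k:Int) * a k * a (m-k)
      = (∑ j ∈ Finset.range (m+1), ((m - j:Nat):Int) * a (m-j) * a (m-(m-j)))
        + ∑ k ∈ Finset.range (m+1), (k:Int) * a k * a (m-k) := by rw [h]; ring
    _ = ∑ j ∈ Finset.range (m+1), (((m:Int) - j) * a (m-j) * a j + (j:Int) * a j * a (m-j)) := by
        rw [h2, Finset.sum_add_distrib]
    _ = ∑ j ∈ Finset.range (m+1), (m:Int) * (a j * a (m-j)) := by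
        refine Finset.sum_congr rfl (fun j hj => ?_); ring
    _ = (m:Int) * ∑ k ∈ Finset.range (m+1), a k * a (m-k) := by rw [Finset.mul_sum]

theorem refl_inner (a : Nat → Int) (n : Nat) :
    2 * ∑ k ∈ Finset.range n, ((k:Int)+1) * a (k+1) * a (n-k)
      = ((n:Int)+1) * ∑ k ∈ Finset.range n, a (k+1) * a (n-k) := by
  have h := Finset.sum_range_reflect (fun k => ((k:Int)+1) * a (k+1) * a (n-k)) n
  have h2 : ∑ j ∈ Finset.range n, (((n - 1 - j : Nat):Int) + 1) * a (n-1-j+1) * a (n-(n-1-j))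
      = ∑ j ∈ Finset.range n, ((n:Int) - j) * a (n-j) * a (j+1) := by
    refine Finset.sum_congr rfl (fun j hj => ?_)
    have hj' : j < n := Finset.mem_range.mp hj
    have e1 : n - 1 - j + 1 = n - j := by omega
    have e2 : n - (n - 1 - j) = j + 1 := by omega
    rw [e1, e2]
    have : ((n - 1 - j : Nat):Int) = (n:Int) - 1 - j := by omega
    rw [this]; ring
  calc 2 * ∑ k ∈ Finset.range n, ((k:Int)+1) * a (k+1) * a (n-k)
      = (∑ j ∈ Finset.range n, (((n - 1 - j:Nat):Int) + 1) * a (n-1-j+1) * a (n-(n-1-j)))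
        + ∑ k ∈ Finset.range n, ((k:Int)+1) * a (k+1) * a (n-k) := by rw [h]; ring
    _ = ∑ j ∈ Finset.range n, (((n:Int) - j) * a (n-j) * a (j+1) + ((j:Int)+1) * a (j+1) * a (n-j)) := by
        rw [h2, Finset.sum_add_distrib]
    _ = ∑ j ∈ Finset.range n, ((n:Int)+1) * (a (j+1) * a (n-j)) := by
        refine Finset.sum_congr rfl (fun j hj => ?_)
        have hj' : j < n := Finset.mem_range.mp hj
        have : a (n - j) = a (n - 1 - j + 1) := by congr 1; omega
        ring
    _ = ((n:Int)+1) * ∑ k ∈ Finset.range n, a (k+1) * a (n-k) := by rw [Finset.mul_sum]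

theorem cId (n : Nat) (hn : 1 ≤ n) :
    (2*(n:Int)+4) * cSeq n + 3*((n:Int)-1) * cSeq (n-1) = ((n:Int)+1) * cSeq (n+1) := by
  obtain ⟨p, rfl⟩ : ∃ p, n = p + 1 := ⟨n - 1, by omega⟩
  cases p with
  | zero => norm_num [cSeq]
  | succ q =>
      show (2*((q:Int)+2)+4) * cSeq (q+2) + 3*(((q:Int)+2)-1) * cSeq (q+2-1) = (((q:Int)+2)+1) * cSeq (q+3)
      have : q + 2 - 1 = q + 1 := by omega
      rw [this]
      show (2*((q:Int)+2)+4) * (4*3^(q+1)) + 3*(((q:Int)+2)-1) * (4*3^q) = (((q:Int)+2)+1) * (4*3^(q+2))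
      push_cast [pow_succ]
      ring

theorem inv_succ (n : Nat) (hn : 1 ≤ n) (ih : InvP n) : InvP (n + 1) := by
  obtain ⟨ihe, ihr, ihs⟩ := ih
  -- step1: substitute the recurrence inside the weighted sum
  have hstep1 : ∑ k ∈ Finset.range n, ((k:Int)+1) * aSeq (k+1) * aSeq (n-k)
      = 2 * ∑ j ∈ Finset.range n, ((j:Int)+1) * aSeq j * aSeq (n-j)
        + 3 * ∑ i ∈ Finset.range (n-1), (i:Int) * aSeq i * aSeq (n-1-i) := by
    obtain ⟨p, rfl⟩ : ∃ p, n = p + 1 := ⟨n - 1, by omega⟩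
    rw [Finset.sum_range_succ' (fun k => ((k:Int)+1) * aSeq (k+1) * aSeq (p+1-k)) p]
    rw [Finset.sum_range_succ' (fun j => ((j:Int)+1) * aSeq j * aSeq (p+1-j)) p]
    have e0 : p + 1 - 0 = p + 1 := rfl
    have hrec : ∀ k ∈ Finset.range p,
        (((k+1:Nat):Int)+1) * aSeq (k+1+1) * aSeq (p+1-(k+1))
          = (2*((k:Int)+2) * aSeq (k+1) + 3*(k:Int) * aSeq k) * aSeq (p-k) := by
      intro k hk
      have hk' : k < p := Finset.mem_range.mp hk
      have h1 : p + 1 - (k+1) = p - k := by omega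
      have h2 := ihr (k+2) (by omega) (by omega)
      have h3 : ((k+2:Nat):Int) = (k:Int)+2 := by push_cast; ring
      have h4 : k + 2 - 1 = k + 1 := by omega
      have h5 : k + 2 - 2 = k := by omega
      rw [h3, h4, h5] at h2
      have h6 : (((k+1:Nat):Int)+1) = (k:Int)+2 := by push_cast; ring
      rw [h1, h6]
      calc ((k:Int)+2) * aSeq (k+1+1) * aSeq (p-k)
          = (((k:Int)+2) * aSeq (k+2)) * aSeq (p-k) := by norm_num
        _ = (2*((k:Int)+2) * aSeq (k+1) + 3*(k:Int) * aSeq k) * aSeq (p-k) := by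
            rw [show ((k:Int)+2) * aSeq (k+2) = 2*((k:Int)+2)*aSeq (k+1) + 3*((k:Int)+2-2)*aSeq k from h2]
            ring_nf
    rw [Finset.sum_congr rfl hrec]
    have hsplit : ∑ k ∈ Finset.range p, (2*((k:Int)+2) * aSeq (k+1) + 3*(k:Int) * aSeq k) * aSeq (p-k)
        = 2 * ∑ k ∈ Finset.range p, ((k:Int)+2) * aSeq (k+1) * aSeq (p-k)
          + 3 * ∑ k ∈ Finset.range p, (k:Int) * aSeq k * aSeq (p-k) := by
      rw [Finset.mul_sum, Finset.mul_sum, ← Finset.sum_add_distrib]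
      exact Finset.sum_congr rfl (fun k hk => by ring)
    rw [hsplit]
    have hcast : ∀ k ∈ Finset.range p, (((k+1:Nat):Int)+1) * aSeq (k+1) * aSeq (p+1-(k+1))
        = ((k:Int)+2) * aSeq (k+1) * aSeq (p-k) := by
      intro k hk
      have hk' : k < p := Finset.mem_range.mp hk
      have h1 : p + 1 - (k+1) = p - k := by omega
      have h6 : (((k+1:Nat):Int)+1) = (k:Int)+2 := by push_cast; ring
      rw [h1, h6]
    rw [Finset.sum_congr rfl hcast]
    have hp1 : p + 1 - 1 = p := by omega
    rw [hp1]
    norm_num [aSeq_one, aSeq_zero]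
    ring
  -- divisibility facts
  have hinner4 : (4:Int) ∣ ∑ k ∈ Finset.range n, aSeq (k+1) * aSeq (n-k) := by
    refine Finset.dvd_sum (fun k hk => ?_)
    have hk' : k < n := Finset.mem_range.mp hk
    obtain ⟨u, hu⟩ := ihe (k+1) (by omega) (by omega)
    obtain ⟨v, hv⟩ := ihe (n-k) (by omega) (by omega)
    exact ⟨u * v, by rw [hu, hv]; ring⟩
  have hc4 : (4:Int) ∣ cSeq (n+1) := ⟨3^n, rfl⟩
  obtain ⟨t, ht⟩ : (4:Int) ∣ (cSeq (n+1) - ∑ k ∈ Finset.range n, aSeq (k+1) * aSeq (n-k)) :=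
    dvd_sub hc4 hinner4
  -- the key identity
  have hW2 := refl_inner aSeq n
  have hP1 := refl_weighted aSeq n
  have hP2 := refl_weighted aSeq (n-1)
  have hSn : ∑ k ∈ Finset.range (n+1), aSeq k * aSeq (n-k) = cSeq n := ihs n le_rfl
  have hSn1 : ∑ k ∈ Finset.range (n-1+1), aSeq k * aSeq (n-1-k) = cSeq (n-1) := ihs (n-1) (by omega)
  have hcast1 : ((n-1:Nat):Int) = (n:Int) - 1 := by omega
  -- express the two partial sums through the full weighted/plain sums
  have hA1 : ∑ j ∈ Finset.range n, ((j:Int)+1) * aSeq j * aSeq (n-j)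
      = (∑ j ∈ Finset.range (n+1), (j:Int) * aSeq j * aSeq (n-j))
        + (∑ k ∈ Finset.range (n+1), aSeq k * aSeq (n-k)) - ((n:Int)+1) * aSeq n := by
    have hpeel : ∑ j ∈ Finset.range (n+1), ((j:Int)+1) * aSeq j * aSeq (n-j)
        = (∑ j ∈ Finset.range n, ((j:Int)+1) * aSeq j * aSeq (n-j)) + ((n:Int)+1) * aSeq n * aSeq (n-n) := by
      exact_mod_cast Finset.sum_range_succ (fun j => ((j:Int)+1) * aSeq j * aSeq (n-j)) n
    have hsplit : ∑ j ∈ Finset.range (n+1), ((j:Int)+1) * aSeq j * aSeq (n-j)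
        = (∑ j ∈ Finset.range (n+1), (j:Int) * aSeq j * aSeq (n-j))
          + ∑ k ∈ Finset.range (n+1), aSeq k * aSeq (n-k) := by
      rw [← Finset.sum_add_distrib]
      exact Finset.sum_congr rfl (fun j hj => by ring)
    have hnn : n - n = 0 := by omega
    rw [hnn, aSeq_zero] at hpeel
    have := hsplit.symm.trans hpeel
    linarith [this]
  have hA2 : ∑ i ∈ Finset.range (n-1), (i:Int) * aSeq i * aSeq (n-1-i)
      = (∑ i ∈ Finset.range (n-1+1), (i:Int) * aSeq i * aSeq (n-1-i)) - ((n:Int)-1) * aSeq (n-1) := by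
    have hpeel : ∑ i ∈ Finset.range (n-1+1), (i:Int) * aSeq i * aSeq (n-1-i)
        = (∑ i ∈ Finset.range (n-1), (i:Int) * aSeq i * aSeq (n-1-i)) + ((n-1:Nat):Int) * aSeq (n-1) * aSeq (n-1-(n-1)) := by
      exact Finset.sum_range_succ _ (n-1)
    have hnn : n - 1 - (n-1) = 0 := by omega
    rw [hnn, aSeq_zero, hcast1] at hpeel
    linarith [hpeel]
  have hcid := cId n hn
  have key : ((n:Int)+1) * (cSeq (n+1) - ∑ k ∈ Finset.range n, aSeq (k+1) * aSeq (n-k))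
      = 2 * (2*((n:Int)+1)*aSeq n + 3*((n:Int)-1)*aSeq (n-1)) := by
    rw [hcast1] at hP2
    linear_combination hW2 - 2*hstep1 - 4*hA1 - 6*hA2 - 2*hP1 - 3*hP2
      - (2*(n:Int)+4)*hSn - 3*((n:Int)-1)*hSn1 - hcid
  -- solve for the new value
  have hX : 2*((n:Int)+1)*aSeq n + 3*((n:Int)-1)*aSeq (n-1) = ((n:Int)+1) * (2*t) := by
    have h2 : (2:Int) * (2*((n:Int)+1)*aSeq n + 3*((n:Int)-1)*aSeq (n-1))
        = 2 * (((n:Int)+1) * (2*t)) := by rw [← key, ht]; ring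
    exact mul_left_cancel₀ two_ne_zero h2
  have haS : aSeq (n+1) = 2*t := by
    have h := aSeq_eq (n+1) (by omega)
    have e1 : n + 1 - 1 = n := by omega
    have e2 : n + 1 - 2 = n - 1 := by omega
    have e3 : ((n+1:Nat):Int) = (n:Int)+1 := by push_cast; ring
    rw [e1, e2, e3] at h
    have e4 : 2 * ((n:Int)+1) * aSeq n + 3 * ((n:Int)+1-2) * aSeq (n-1)
        = ((n:Int)+1) * (2*t) := by rw [← hX]; ring
    rw [h, e4, PySem.Int.floordiv_eq_ediv_of_pos (by positivity)]
    exact Int.mul_ediv_cancel_left _ (by positivity)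
  have hS1 : S (n+1) = cSeq (n+1) := by
    unfold S
    rw [Finset.sum_range_succ _ (n+1)]
    rw [Finset.sum_range_succ' (fun k => aSeq k * aSeq (n+1-k)) n]
    have hcg : ∀ k ∈ Finset.range n, aSeq (k+1) * aSeq (n+1-(k+1)) = aSeq (k+1) * aSeq (n-k) := by
      intro k hk; congr 2; omega
    rw [Finset.sum_congr rfl hcg]
    have hnn : n + 1 - (n+1) = 0 := by omega
    have hz : n + 1 - 0 = n + 1 := rfl
    rw [hnn, hz, aSeq_zero, haS]
    linarith [ht]
  refine ⟨?_, ?_, ?_⟩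
  · intro m h1 hm
    rcases Nat.lt_succ_iff_lt_or_eq.mp (Nat.lt_succ_of_le hm) with h | h
    · exact ihe m h1 (by omega)
    · subst h; exact ⟨t, by rw [haS]⟩
  · intro m h2 hm
    rcases Nat.lt_succ_iff_lt_or_eq.mp (Nat.lt_succ_of_le hm) with h | h
    · exact ihr m h2 (by omega)
    · subst h
      have e1 : n + 1 - 1 = n := by omega
      have e2 : n + 1 - 2 = n - 1 := by omega
      have e3 : ((n+1:Nat):Int) = (n:Int)+1 := by push_cast; ring
      rw [e1, e2, e3, haS]
      linear_combination -hX
  · intro m hm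
    rcases Nat.lt_succ_iff_lt_or_eq.mp (Nat.lt_succ_of_le hm) with h | h
    · exact ihs m (by omega)
    · subst h; exact hS1

theorem invP_one : InvP 1 := by
  refine ⟨?_, ?_, ?_⟩
  · intro m h1 hm
    interval_cases m
    · rw [aSeq_one]
  · intro m h2 hm; omega
  · intro m hm
    interval_cases m
    · simp [S, aSeq_zero, cSeq]
    · simp [S, Finset.sum_range_succ, aSeq_zero, aSeq_one, cSeq]

theorem inv_all : ∀ n, InvP n
  | 0 => ⟨fun m h1 hm => by omega,
          fun m h2 hm => by omega,
          fun m hm => by interval_cases m; simp [S, aSeq_zero, cSeq]⟩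
  | 1 => invP_one
  | (n+2) => inv_succ (n+1) (by omega) (inv_all (n+1))

def stL (s : Nat → Int) (M m : Nat) : List Int :=
  (List.range M).map (fun i => if i < m then s i else 0)

theorem stL_getD (s : Nat → Int) (M m i : Nat) (hi : i < M) :
    (stL s M m).getD i 0 = if i < m then s i else 0 := by
  simp [stL, List.getD_eq_getElem?_getD, List.getElem?_map, List.getElem?_range, hi]

theorem stL_set (s : Nat → Int) (M m : Nat) (hm : m < M) :
    (stL s M m).set m (s m) = stL s M (m + 1) := by
  apply List.ext_getElem
  · simp [stL]
  · intro i h1 h2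
    have hiM : i < M := by simpa [stL] using h2
    rw [List.getElem_set]
    by_cases him : m = i
    · subst him
      simp [stL, hiM]
    · simp only [stL, List.getElem_map, List.getElem_range]
      have : (i < m) = (i < m + 1) := by
        apply propext; constructor <;> intro <;> omega
      split_ifs with g1 g2 g2 <;> first | rfl | omega
  -- note: branch may need adjusting

theorem loopA (M : Nat) : ∀ k m, 2 ≤ m → m + k = M →
    (PySem.List.pyRange (m : Int) (M : Int) 1).foldl
      (fun a n =>
        PySem.List.pySetD a n
          (PySem.Int.floordiv
            (2 * n * PySem.List.pyGetD a (n - 1) 0 + 3 * (n - 2) * PySem.List.pyGetD a (n - 2) 0)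
            n))
      (stL aSeq M m) = stL aSeq M M := by
  intro k
  induction k with
  | zero =>
      intro m hm2 hmk
      have : m = M := by omega
      subst this
      rw [PySem.List.pyRange_one_eq_nil le_rfl]
      rfl
  | succ k ih =>
      intro m hm2 hmk
      have hmM : m < M := by omega
      have hcons : PySem.List.pyRange (m : Int) (M : Int) 1
          = (m : Int) :: PySem.List.pyRange ((m : Int) + 1) (M : Int) 1 :=
        PySem.List.pyRange_one_cons (by exact_mod_cast hmM)
      rw [hcons]
      simp only [List.foldl_cons]
      have hg1 : PySem.List.pyGetD (stL aSeq M m) ((m : Int) - 1) 0 = aSeq (m - 1) := by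
        rw [show (m : Int) - 1 = ((m - 1 : Nat) : Int) by omega]
        rw [PySem.List.pyGetD_natCast]
        rw [stL_getD aSeq M m (m-1) (by omega)]
        simp [show m - 1 < m by omega]
      have hg2 : PySem.List.pyGetD (stL aSeq M m) ((m : Int) - 2) 0 = aSeq (m - 2) := by
        rw [show (m : Int) - 2 = ((m - 2 : Nat) : Int) by omega]
        rw [PySem.List.pyGetD_natCast]
        rw [stL_getD aSeq M m (m-2) (by omega)]
        simp [show m - 2 < m by omega]
      have hv : PySem.Int.floordiv
          (2 * (m : Int) * aSeq (m - 1) + 3 * ((m : Int) - 2) * aSeq (m - 2)) (m : Int)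
          = aSeq m := (aSeq_eq m hm2).symm
      rw [hg1, hg2, hv, PySem.List.pySetD_natCast, stL_set aSeq M m hmM]
      rw [show ((m : Int) + 1) = ((m + 1 : Nat) : Int) by push_cast; ring]
      exact ih (m + 1) (by omega) (by omega)

theorem init2 (M : Nat) (hM : 2 ≤ M) :
    ((List.replicate M (0:Int)).set 0 1).set 1 2 = stL aSeq M 2 := by
  apply List.ext_getElem
  · simp [stL]
  · intro i h1 h2
    have hiM : i < M := by simpa [stL] using h2
    rw [List.getElem_set, List.getElem_set]
    simp only [stL, List.getElem_map, List.getElem_range, List.getElem_replicate]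
    match i with
    | 0 => norm_num [aSeq]
    | 1 => norm_num [aSeq]
    | (i+2) =>
        have h2 : ¬((i:Nat) + 2 < 2) := by omega
        simp [h2]

theorem portA_eq (N : Int) (h : 1 ≤ N) :
    betagamma_full_gf_coeffs N = (List.range N.toNat).map aSeq := by
  obtain ⟨M, rfl⟩ : ∃ M : Nat, N = (M : Int) := ⟨N.toNat, by omega⟩
  have hM : 1 ≤ M := by exact_mod_cast h
  dsimp only [betagamma_full_gf_coeffs]
  rw [PySem.List.pyRepeat_singleton]
  simp only [Int.toNat_natCast]
  have e0 : PySem.List.pySetD (List.replicate M (0:Int)) 0 1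
      = (List.replicate M (0:Int)).set 0 1 := by
    rw [PySem.List.pySetD_of_nonneg _ _ (by norm_num)]
    norm_num
  have e1 : PySem.List.pySetD ((List.replicate M (0:Int)).set 0 1) 1 2
      = ((List.replicate M (0:Int)).set 0 1).set 1 2 := by
    rw [PySem.List.pySetD_of_nonneg _ _ (by norm_num)]
    norm_num
  rw [e0]
  by_cases hN1 : (M : Int) > 1
  · have hM2 : 2 ≤ M := by exact_mod_cast hN1
    rw [if_pos hN1, e1]
    rw [init2 M hM2]
    have hl := loopA M (M - 2) 2 le_rfl (by omega)
    norm_num at hl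
    rw [hl]
    unfold stL
    exact List.map_congr_left (fun i hi => by
      simp only [List.mem_range] at hi
      simp [hi])
  · have hM1 : M = 1 := by omega
    rw [if_neg hN1]
    subst hM1
    rw [PySem.List.pyRange_one_eq_nil (by norm_num)]
    simp [List.range_succ]
    rfl

-- central trinomial coefficients: t_0 = 1, t_1 = 1,
-- (n+2)·t_(n+2) = (2(n+1)+1)·t_(n+1) + 3(n+1)·t_n (floor division as in B).
def tSeq : Nat → Int
  | 0 => 1
  | 1 => 1
  | (n + 2) =>
      PySem.Int.floordiv
        ((2 * ((n : Int) + 1) + 1) * tSeq (n + 1) + 3 * ((n : Int) + 1) * tSeq n) ((n : Int) + 2)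

theorem tSeq_zero : tSeq 0 = 1 := rfl
theorem tSeq_one : tSeq 1 = 1 := rfl

theorem tSeq_eq (m : Nat) (hm : 1 ≤ m) :
    tSeq (m + 1) = PySem.Int.floordiv
      ((2 * (m : Int) + 1) * tSeq m + 3 * (m : Int) * tSeq (m - 1)) ((m : Int) + 1) := by
  obtain ⟨p, rfl⟩ : ∃ p, m = p + 1 := ⟨m - 1, by omega⟩
  show tSeq (p + 2) = _
  have e1 : p + 1 - 1 = p := by omega
  rw [tSeq, e1]
  have c1 : ((p + 1 : Nat) : Int) = (p : Int) + 1 := by push_cast; ring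
  rw [c1]
  congr 1

-- exactness of A's division, extracted from the convolution invariant
theorem a_exact (m : Nat) (hm : 2 ≤ m) :
    (m : Int) * aSeq m = 2 * m * aSeq (m - 1) + 3 * ((m : Int) - 2) * aSeq (m - 2) :=
  (inv_all m).2.1 m hm le_rfl

def TR (n : Nat) : Prop :=
  (∀ m, 2 ≤ m → m ≤ n → (m : Int) * tSeq m = (2 * (m : Int) - 1) * tSeq (m - 1) + 3 * ((m : Int) - 1) * tSeq (m - 2)) ∧
  (∀ m, 1 ≤ m → m ≤ n → aSeq m = tSeq m + tSeq (m - 1))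

theorem tr_two : TR 2 := by
  have ht2 : tSeq 2 = 3 := by
    show tSeq (0 + 2) = 3
    rw [tSeq]
    norm_num [tSeq_zero, tSeq_one]
  have ha2 : aSeq 2 = 4 := by
    rw [aSeq_eq 2 le_rfl]
    norm_num [aSeq_zero, aSeq_one]
  constructor
  · intro m h2 hm
    interval_cases m
    rw [ht2]
    norm_num [tSeq_zero, tSeq_one]
  · intro m h1 hm
    interval_cases m
    · rw [aSeq_one, tSeq_one, tSeq_zero]; norm_num
    · rw [ha2, ht2, tSeq_one]
      norm_num

theorem tr_succ (n : Nat) (hn : 2 ≤ n) (ih : TR n) : TR (n + 1) := by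
  obtain ⟨ihex, ihsum⟩ := ih
  have hex_n := ihex n hn le_rfl
  have hsum_n := ihsum n (by omega) le_rfl
  have hsum_n1 := ihsum (n-1) (by omega) (by omega)
  have hax := a_exact (n+1) (by omega)
  have e1 : n + 1 - 1 = n := by omega
  have e2 : n + 1 - 2 = n - 1 := by omega
  have e3 : ((n+1:Nat):Int) = (n:Int) + 1 := by push_cast; ring
  have e4 : n - 1 - 1 = n - 2 := by omega
  rw [e1, e2, e3] at hax
  rw [e4] at hsum_n1
  have hV : (2 * (n:Int) + 1) * tSeq n + 3 * (n:Int) * tSeq (n-1)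
      = ((n:Int) + 1) * (aSeq (n+1) - tSeq n) := by
    linear_combination -hax - 2*((n:Int)+1)*hsum_n - 3*((n:Int)-1)*hsum_n1 + hex_n
  have htS : tSeq (n+1) = aSeq (n+1) - tSeq n := by
    rw [tSeq_eq n (by omega), hV, PySem.Int.floordiv_eq_ediv_of_pos (by positivity)]
    exact Int.mul_ediv_cancel_left _ (by positivity)
  constructor
  · intro m h2 hm
    rcases Nat.lt_succ_iff_lt_or_eq.mp (Nat.lt_succ_of_le hm) with h | h
    · exact ihex m h2 (by omega)
    · subst h
      rw [e1, e2, e3, htS]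
      linear_combination -hV
  · intro m h1 hm
    rcases Nat.lt_succ_iff_lt_or_eq.mp (Nat.lt_succ_of_le hm) with h | h
    · exact ihsum m h1 (by omega)
    · subst h
      rw [e1, htS]
      ring

theorem tr_all : ∀ n, TR n
  | 0 => ⟨fun m h2 hm => by omega, fun m h1 hm => by omega⟩
  | 1 => ⟨fun m h2 hm => by omega,
          fun m h1 hm => by interval_cases m; rw [aSeq_one, tSeq_one, tSeq_zero]; norm_num⟩
  | 2 => tr_two
  | (n+3) => tr_succ (n+2) (by omega) (tr_all (n+2))

theorem a_sum_t (m : Nat) (hm : 1 ≤ m) : aSeq m = tSeq m + tSeq (m - 1) :=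
  (tr_all m).2 m hm le_rfl

theorem loopT (M : Nat) : ∀ k m, 1 ≤ m → m + k = M →
    ((PySem.List.pyRange (m : Int) (M : Int) 1).foldl
      (fun st n =>
        if n == 0 then (st.1 ++ [(1 : Int)], st.2)
        else (st.1 ++ [st.2.2 + st.2.1],
              (st.2.2, PySem.Int.floordiv ((2 * n + 1) * st.2.2 + 3 * n * st.2.1) (n + 1))))
      ((List.range m).map aSeq, (tSeq (m - 1), tSeq m))).1 = (List.range M).map aSeq := by
  intro k
  induction k with
  | zero =>
      intro m hm1 hmk
      have : m = M := by omega
      subst this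
      rw [PySem.List.pyRange_one_eq_nil le_rfl]
      rfl
  | succ k ih =>
      intro m hm1 hmk
      have hmM : m < M := by omega
      have hcons : PySem.List.pyRange (m : Int) (M : Int) 1
          = (m : Int) :: PySem.List.pyRange ((m : Int) + 1) (M : Int) 1 :=
        PySem.List.pyRange_one_cons (by exact_mod_cast hmM)
      rw [hcons]
      simp only [List.foldl_cons]
      have hne : ((m : Int) == 0) = false := by
        simp only [beq_eq_false_iff_ne, ne_eq]
        omega
      rw [hne]
      simp only [Bool.false_eq_true, if_false]
      have happ : (List.range m).map aSeq ++ [tSeq m + tSeq (m - 1)]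
          = (List.range (m + 1)).map aSeq := by
        rw [List.range_succ, List.map_append, List.map_cons, List.map_nil,
            a_sum_t m hm1]
      have hstep : PySem.Int.floordiv ((2 * (m : Int) + 1) * tSeq m + 3 * (m : Int) * tSeq (m - 1)) ((m : Int) + 1)
          = tSeq (m + 1) := (tSeq_eq m hm1).symm
      rw [happ, hstep]
      have e5 : ((m : Int) + 1) = ((m + 1 : Nat) : Int) := by push_cast; ring
      rw [e5]
      have e6 : tSeq m = tSeq ((m + 1) - 1) := by norm_num
      rw [e6]
      exact ih (m + 1) (by omega) (by omega)

theorem portB_eq (N : Int) (h : 1 ≤ N) :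
    betagamma_full_gf_coeffs_alt N = (List.range N.toNat).map aSeq := by
  obtain ⟨M, rfl⟩ : ∃ M : Nat, N = (M : Int) := ⟨N.toNat, by omega⟩
  have hM : 1 ≤ M := by exact_mod_cast h
  dsimp only [betagamma_full_gf_coeffs_alt]
  simp only [Int.toNat_natCast]
  have hcons : PySem.List.pyRange 0 (M : Int) 1
      = 0 :: PySem.List.pyRange 1 (M : Int) 1 :=
    PySem.List.pyRange_one_cons (by exact_mod_cast hM)
  rw [hcons]
  simp only [List.foldl_cons, BEq.rfl, if_true, List.nil_append]
  have h1 : ([(1:Int)], ((1:Int), (1:Int)))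
      = ((List.range 1).map aSeq, (tSeq (1 - 1), tSeq 1)) := by
    norm_num [List.range_succ, aSeq_zero, tSeq_zero, tSeq_one]
  rw [h1]
  have hl := loopT M (M - 1) 1 le_rfl (by omega)
  simp only [Nat.cast_one] at hl
  exact hl

-- ===== VERDICT (by name: the statement is the Claim_ definition above) =====
theorem betagamma_full_gf_coeffs_spec : Claim_equal_betagamma_full_gf_coeffs := by
  intro N _ hpre
  unfold Spec_betagamma_full_gf_coeffs
  rw [portA_eq N hpre, portB_eq N hpre]
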